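-- pv_equiv track=rewrite | github.com/Kwounsu/Algorithms | 프로그래머스/퍼즐 맞추기.py | solution
-- ===== SOURCE A (Python) =====
-- from collections import deque
--
-- def make_block_fit(b):
--     min_row = min_col = float('inf')
--     for r, c in b:
--         min_row = min(min_row, r)
--         min_col = min(min_col, c)
--
--     new_block = []
--     for idx in range(len(b)):
--         new_block.append((b[idx][0] - min_row, b[idx][1] - min_col))
--     return sorted(new_block)
--
-- def rotate(b):
--     ns = []
--     for i in range(len(b)):
--         ns.append((b[i][1], -b[i][0]))
--     return make_block_fit(ns)
--
-- def rotate_match(s, b):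
--     if s == b:
--         return 1
--     for _ in range(3):
--         b = rotate(b)
--         if s == b:
--             return len(s)
--     return 0
--
-- def solution(game_board, puzzle):
--     answer = 0
--     delta = [(1, 0), (0, 1), (-1, 0), (0, -1)]
--     N = len(game_board)
--
--     def bfs_move(s, board, x, y):
--         q = deque([s])
--         visit = []
--
--         while q:
--             r, c = q.popleft()
--             visit.append((r, c))
--             board[r][c] = y
--
--             for dr, dc in delta:
--                 nr, nc = r + dr, c + dc
--                 if 0 <= nr < N and 0 <= nc < N and board[nr][nc] == x:
--                     q.append((nr, nc))
--
--         return make_block_fit(visit)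
--
--     # find all spots and blocks to match
--     spots, blocks = [], []
--     for i in range(N):
--         for j in range(N):
--             if game_board[i][j] == 0:
--                 spots.append(bfs_move((i, j), game_board, 0, 1))
--             if puzzle[i][j] == 1:
--                 blocks.append(bfs_move((i, j), puzzle, 1, 0))
--
--     # match
--     spots.sort(key=len)
--     blocks.sort(key=len)
--     for spot in spots:
--         for block in blocks:
--             if len(spot) < len(block):
--                 break
--             if len(spot) == len(block):
--                 answer += rotate_match(spot, block)
--
--     return answer
-- ===== SOURCE B (Python) =====
-- from collections import deque
--
-- # B: same flood-fill extraction (boards are mutated in place exactly as in A),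
-- # but the matching phase uses hash tables keyed by the canonical shapes instead
-- # of comparing every spot against every block with fresh rotations.
--
-- def _fit(cells):
--     mr = min(r for r, c in cells)
--     mc = min(c for r, c in cells)
--     return sorted((r - mr, c - mc) for r, c in cells)
--
--
-- def _rot(shape):
--     return _fit([(c, -r) for r, c in shape])
--
--
-- def _extract(board, n, x, y):
--     """Collect the normalized shape of every x-region of the n x n board,
--     flipping its cells to y (same queue discipline and in-place mutation as A)."""
--     shapes = []
--     for i in range(n):
--         for j in range(n):
--             if board[i][j] != x:
--                 continue
--             q = deque([(i, j)])
--             visit = []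
--             while q:
--                 r, c = q.popleft()
--                 visit.append((r, c))
--                 board[r][c] = y
--                 for dr, dc in ((1, 0), (0, 1), (-1, 0), (0, -1)):
--                     nr, nc = r + dr, c + dc
--                     if 0 <= nr < n and 0 <= nc < n and board[nr][nc] == x:
--                         q.append((nr, nc))
--             shapes.append(_fit(visit))
--     return shapes
--
--
-- def solution(game_board, puzzle):
--     n = len(game_board)
--     spots = _extract(game_board, n, 0, 1)
--     blocks = _extract(puzzle, n, 1, 0)
--
--     spot_lens = {len(s) for s in spots}
--     exact = {}   # canonical shape -> number of blocks with exactly that shape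
--     rots = {}    # shape -> number of blocks that become it only after 1-3 rotations
--     for b in blocks:
--         key = tuple(b)
--         exact[key] = exact.get(key, 0) + 1
--         if len(b) not in spot_lens:
--             continue   # no spot of this size: rotations of b can never match a spot
--         seen = set()
--         r = b
--         for _ in range(3):
--             r = _rot(r)
--             k = tuple(r)
--             if k != key and k not in seen:
--                 seen.add(k)
--                 rots[k] = rots.get(k, 0) + 1
--
--     ans = 0
--     for s in spots:
--         k = tuple(s)
--         ans += exact.get(k, 0) + rots.get(k, 0) * len(s)
--     return ans
-- ===== Notes on version B (the rewrite author's own statement) =====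
-- stated objective: alternative
-- what changed: The all-pairs matching loop (every spot compared against every block, recomputing up to three rotations per pair) is replaced by hash tables: blocks are counted once into an exact-shape table and a rotated-shape table (rotations computed once per block, only for block sizes that occur among spots), and each spot is then matched by two dictionary lookups; the flood-fill extraction is kept (it mutates the boards in place exactly as A does).
import Mathlib
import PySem

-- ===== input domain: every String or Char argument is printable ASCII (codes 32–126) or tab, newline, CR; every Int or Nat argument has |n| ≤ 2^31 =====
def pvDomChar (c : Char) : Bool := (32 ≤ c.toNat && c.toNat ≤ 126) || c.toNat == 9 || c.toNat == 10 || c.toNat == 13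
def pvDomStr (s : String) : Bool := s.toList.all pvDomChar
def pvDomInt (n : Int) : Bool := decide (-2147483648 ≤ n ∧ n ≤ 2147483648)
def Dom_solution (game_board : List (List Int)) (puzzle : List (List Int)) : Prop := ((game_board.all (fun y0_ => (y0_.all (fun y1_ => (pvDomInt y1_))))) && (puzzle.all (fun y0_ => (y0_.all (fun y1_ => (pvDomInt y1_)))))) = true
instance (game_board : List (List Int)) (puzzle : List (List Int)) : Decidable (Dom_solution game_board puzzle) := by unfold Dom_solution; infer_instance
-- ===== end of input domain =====

-- B replaces A's all-pairs spot-vs-block matching (with rotations recomputed per pair) by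
-- dictionaries keyed by the canonical shapes (rotations computed once per block); same
-- flood-fill extraction. Both A and B mutate game_board and puzzle in place identically;
-- the equivalence proved here is about the return value.

-- ===== PORT A =====
-- helpers shared by both ports: the Python of B contains make_block_fit / rotate / the
-- BFS flood fill verbatim (as _fit / _rot / the loop inside _extract), so the ports share
-- these transliterations.

-- make_block_fit: min-loop, append-loop, sorted (Python sorts the pair tuples lexicographically)
-- float('inf') start of the min loop is replaced by a sentinel larger than any coordinate
-- reachable here (coordinates are bounded by the board size)
def makeBlockFit (b : List (Int × Int)) : List (Int × Int) :=
  let m := b.foldl (fun (m : Int × Int) rc => (min m.1 rc.1, min m.2 rc.2))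
    (4611686018427387904, 4611686018427387904)
  let newBlock := b.foldl (fun acc rc => acc ++ [(rc.1 - m.1, rc.2 - m.2)]) ([] : List (Int × Int))
  PySem.List.sorted2 newBlock Prod.fst Prod.snd

-- rotate
def rotatePy (b : List (Int × Int)) : List (Int × Int) :=
  let ns := b.foldl (fun acc rc => acc ++ [(rc.2, -rc.1)]) ([] : List (Int × Int))
  makeBlockFit ns

-- board[i][j] as an Option (none = IndexError, excluded by Pre_)
def get2 (board : List (List Int)) (i j : Int) : Option Int :=
  (PySem.List.pyGet? board i).bind fun row => PySem.List.pyGet? row j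

-- board[r][c] = v (indices produced by the scan/queue are nonnegative; out of range = IndexError, excluded by Pre_)
def set2 (board : List (List Int)) (r c : Int) (v : Int) : List (List Int) :=
  PySem.List.pySetD board r (PySem.List.pySetD (PySem.List.pyGetD board r []) c v)

def deltaPy : List (Int × Int) := [(1, 0), (0, 1), (-1, 0), (0, -1)]

-- the while loop of bfs_move; fuel bounds the number of pops, exhaustion returns the state reached
def bfsLoop (N x y : Int) : Nat → List (Int × Int) → List (Int × Int) → List (List Int) →
    List (Int × Int) × List (List Int)
  | 0, _, visit, board => (visit, board)
  | _ + 1, [], visit, board => (visit, board)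
  | fuel + 1, rc :: q, visit, board =>
    let visit := visit ++ [rc]
    let board := set2 board rc.1 rc.2 y
    let q := deltaPy.foldl (fun q d =>
      let nr := rc.1 + d.1
      let nc := rc.2 + d.2
      if 0 ≤ nr ∧ nr < N ∧ 0 ≤ nc ∧ nc < N ∧ get2 board nr nc = some x then q ++ [(nr, nc)]
      else q) q
    bfsLoop N x y fuel q visit board

def bfsMove (N : Int) (s : Int × Int) (board : List (List Int)) (x y : Int) :
    List (Int × Int) × List (List Int) :=
  let r := bfsLoop N x y (2 ^ (N.toNat * N.toNat) + 1) [s] [] board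
  (makeBlockFit r.1, r.2)

-- the inner loop of rotate_match ('for _ in range(3): b = rotate(b); if s == b: return len(s)')
def rotateMatchLoop (s : List (Int × Int)) : Nat → List (Int × Int) → Int
  | 0, _ => 0
  | k + 1, b =>
    let b' := rotatePy b
    if s = b' then PySem.List.len s else rotateMatchLoop s k b'

def rotateMatch (s b : List (Int × Int)) : Int :=
  if s = b then 1 else rotateMatchLoop s 3 b

-- one step of A's scan for game_board ('if game_board[i][j] == 0: spots.append(bfs_move(...))')
def scanStepG (N i j : Int) (st : List (List Int) × List (List (Int × Int))) :
    List (List Int) × List (List (Int × Int)) :=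
  if get2 st.1 i j = some 0 then
    let p := bfsMove N (i, j) st.1 0 1
    (p.2, st.2 ++ [p.1])
  else st

-- one step of A's scan for puzzle ('if puzzle[i][j] == 1: blocks.append(bfs_move(...))')
def scanStepP (N i j : Int) (st : List (List Int) × List (List (Int × Int))) :
    List (List Int) × List (List (Int × Int)) :=
  if get2 st.1 i j = some 1 then
    let p := bfsMove N (i, j) st.1 1 0
    (p.2, st.2 ++ [p.1])
  else st

-- the inner 'for block in blocks' loop with its break
def matchInner (s : List (Int × Int)) : List (List (Int × Int)) → Int → Int
  | [], answer => answer
  | b :: bs, answer =>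
    if PySem.List.len s < PySem.List.len b then answer
    else matchInner s bs
      (answer + if PySem.List.len s = PySem.List.len b then rotateMatch s b else 0)

def solution (game_board : List (List Int)) (puzzle : List (List Int)) : Int :=
  let N : Int := PySem.List.len game_board
  let scan := (PySem.List.pyRange 0 N 1).foldl (fun st i =>
      (PySem.List.pyRange 0 N 1).foldl
        (fun st j => (scanStepG N i j st.1, scanStepP N i j st.2)) st)
    ((game_board, ([] : List (List (Int × Int)))), (puzzle, ([] : List (List (Int × Int)))))
  let spots := PySem.List.sorted scan.1.2 (fun s => PySem.List.len s) false
  let blocks := PySem.List.sorted scan.2.2 (fun s => PySem.List.len s) false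
  spots.foldl (fun answer s => matchInner s blocks answer) 0

-- ===== PORT B =====
-- one step of B's _extract scan ('if board[i][j] != x: continue')
def extractStep (N x y i j : Int) (st : List (List Int) × List (List (Int × Int))) :
    List (List Int) × List (List (Int × Int)) :=
  if get2 st.1 i j ≠ some x then st
  else
    let p := bfsMove N (i, j) st.1 x y
    (p.2, st.2 ++ [p.1])

def extract (board : List (List Int)) (N x y : Int) : List (List (Int × Int)) :=
  ((PySem.List.pyRange 0 N 1).foldl (fun st i =>
      (PySem.List.pyRange 0 N 1).foldl (fun st j => extractStep N x y i j st) st)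
    (board, ([] : List (List (Int × Int))))).2

-- one iteration of B's 'for _ in range(3)' rotation loop: state (r, seen, rots)
def rotStep (b : List (Int × Int))
    (st : List (Int × Int) × PySem.Set (List (Int × Int)) × PySem.Dict (List (Int × Int)) Int) :
    List (Int × Int) × PySem.Set (List (Int × Int)) × PySem.Dict (List (Int × Int)) Int :=
  let r := rotatePy st.1
  if r ≠ b ∧ ¬ (PySem.Set.contains st.2.1 r = true) then
    (r, PySem.Set.add st.2.1 r, st.2.2.insert r (st.2.2.getD r 0 + 1))
  else (r, st.2.1, st.2.2)

def solution_alt (game_board : List (List Int)) (puzzle : List (List Int)) : Int :=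
  let N : Int := PySem.List.len game_board
  let spots := extract game_board N 0 1
  let blocks := extract puzzle N 1 0
  let spotLens : PySem.Set Int := PySem.Set.ofList (spots.map (fun s => PySem.List.len s))
  let dicts := blocks.foldl (fun d b =>
      (d.1.insert b (d.1.getD b 0 + 1),
       if PySem.Set.contains spotLens (PySem.List.len b) = true then
         (((List.range 3).foldl (fun st _ => rotStep b st)
            (b, (PySem.Set.empty : PySem.Set (List (Int × Int))), d.2)).2.2)
       else d.2))
    ((PySem.Dict.empty : PySem.Dict (List (Int × Int)) Int),
     (PySem.Dict.empty : PySem.Dict (List (Int × Int)) Int))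
  spots.foldl (fun ans s => ans + dicts.1.getD s 0 + dicts.2.getD s 0 * PySem.List.len s) 0

-- ===== PRECONDITION & SPEC =====
-- Pre_ excludes exactly the inputs on which A raises IndexError: a row of game_board, or
-- one of the first len(game_board) rows of puzzle, shorter than len(game_board), or puzzle
-- itself shorter than game_board (A reads cell [i][j] for all i, j < len(game_board)).
def Pre_solution (game_board : List (List Int)) (puzzle : List (List Int)) : Prop :=
  (∀ row ∈ game_board, game_board.length ≤ row.length) ∧
  game_board.length ≤ puzzle.length ∧
  (∀ row ∈ puzzle.take game_board.length, game_board.length ≤ row.length)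
instance (game_board : List (List Int)) (puzzle : List (List Int)) : Decidable (Pre_solution game_board puzzle) := by unfold Pre_solution; infer_instance

def pvWitness_solution : List (List Int) × List (List Int) := ([[0, 1], [1, 1]], [[1, 0], [0, 0]])

def Spec_solution (game_board : List (List Int)) (puzzle : List (List Int)) (out : Int) : Prop := out = solution_alt game_board puzzle
instance (game_board : List (List Int)) (puzzle : List (List Int)) (out : Int) : Decidable (Spec_solution game_board puzzle out) := by unfold Spec_solution; infer_instance

-- ===== CLAIM (what is proved, stated in full; the proofs are below) =====
def Claim_equal_solution : Prop := ∀ (game_board : List (List Int)) (puzzle : List (List Int)), Dom_solution game_board puzzle → Pre_solution game_board puzzle → Spec_solution game_board puzzle (solution game_board puzzle)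

-- ===== LEMMAS AND PROOFS =====

-- a loop over two independent accumulator components is two loops (nested version of foldl_prod_mk)
theorem foldl_nested_prod {α β ι κ : Type} (l₁ : List κ) (l₂ : List ι)
    (f : κ → ι → α → α) (g : κ → ι → β → β) (init : α × β) :
    l₁.foldl (fun st i => l₂.foldl (fun st j => (f i j st.1, g i j st.2)) st) init
    = (l₁.foldl (fun a i => l₂.foldl (fun a j => f i j a) a) init.1,
       l₁.foldl (fun b i => l₂.foldl (fun b j => g i j b) b) init.2) := by
  induction l₁ generalizing init with
  | nil => simp
  | cons i t ih =>
    simp only [List.foldl_cons]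
    rw [show init = (init.1, init.2) from rfl,
      PySem.List.foldl_prod_mk (f := fun a j => f i j a) (g := fun b j => g i j b), ih]

theorem length_makeBlockFit (b : List (Int × Int)) : (makeBlockFit b).length = b.length := by
  simp only [makeBlockFit, PySem.List.foldl_append_singleton_eq_map, List.nil_append]
  rw [(PySem.List.sorted2_perm _ _ _ _).length_eq]
  simp

theorem length_rotatePy (b : List (Int × Int)) : (rotatePy b).length = b.length := by
  simp only [rotatePy, PySem.List.foldl_append_singleton_eq_map, List.nil_append]
  simp [length_makeBlockFit]

theorem rotateMatchLoop_succ (s b : List (Int × Int)) (k : Nat) :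
    rotateMatchLoop s (k + 1) b =
      if s = rotatePy b then PySem.List.len s else rotateMatchLoop s k (rotatePy b) := rfl

theorem rotateMatchLoop_zero (s b : List (Int × Int)) : rotateMatchLoop s 0 b = 0 := rfl

theorem rotateMatch_eq (s b : List (Int × Int)) :
    rotateMatch s b = (if b = s then (1 : Int) else 0) +
      (if s ≠ b ∧ (s = rotatePy b ∨ s = rotatePy (rotatePy b) ∨ s = rotatePy (rotatePy (rotatePy b)))
       then 1 else 0) * (s.length : Int) := by
  unfold rotateMatch
  rw [show (3 : Nat) = 2 + 1 from rfl, rotateMatchLoop_succ,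
    show (2 : Nat) = 1 + 1 from rfl, rotateMatchLoop_succ,
    show (1 : Nat) = 0 + 1 from rfl, rotateMatchLoop_succ, rotateMatchLoop_zero]
  simp only [PySem.List.len_eq]
  by_cases h0 : s = b
  · subst h0; simp
  · have h0' : ¬ b = s := fun e => h0 e.symm
    rw [if_neg h0, if_neg h0']
    by_cases h1 : s = rotatePy b
    · rw [if_pos h1, if_pos ⟨h0, Or.inl h1⟩]; ring
    · rw [if_neg h1]
      by_cases h2 : s = rotatePy (rotatePy b)
      · rw [if_pos h2, if_pos ⟨h0, Or.inr (Or.inl h2)⟩]; ring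
      · rw [if_neg h2]
        by_cases h3 : s = rotatePy (rotatePy (rotatePy b))
        · rw [if_pos h3, if_pos ⟨h0, Or.inr (Or.inr h3)⟩]; ring
        · rw [if_neg h3, if_neg (by tauto)]; ring

theorem rotateMatch_eq_zero_of_len_ne (s b : List (Int × Int)) (h : s.length ≠ b.length) :
    rotateMatch s b = 0 := by
  rw [rotateMatch_eq]
  have hb : ¬ b = s := fun e => h (by rw [e])
  have h1 : ¬ s = rotatePy b := fun e => h (by rw [e, length_rotatePy])
  have h2 : ¬ s = rotatePy (rotatePy b) := fun e => h (by rw [e, length_rotatePy, length_rotatePy])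
  have h3 : ¬ s = rotatePy (rotatePy (rotatePy b)) := fun e =>
    h (by rw [e, length_rotatePy, length_rotatePy, length_rotatePy])
  rw [if_neg hb, if_neg (by tauto)]
  ring

theorem matchInner_eq (s : List (Int × Int)) (bs : List (List (Int × Int))) (acc : Int)
    (h : bs.Pairwise (fun a b => a.length ≤ b.length)) :
    matchInner s bs acc = acc + (bs.map (fun b => rotateMatch s b)).sum := by
  induction bs generalizing acc with
  | nil => simp [matchInner]
  | cons b bs ih =>
    rcases List.pairwise_cons.mp h with ⟨hb, hbs⟩
    by_cases hlt : PySem.List.len s < PySem.List.len b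
    · simp only [matchInner, if_pos hlt]
      have hz : ∀ x ∈ List.map (fun c => rotateMatch s c) (b :: bs), x = 0 := by
        intro x hx
        rcases List.mem_map.mp hx with ⟨c, hc, rfl⟩
        refine rotateMatch_eq_zero_of_len_ne s c ?_
        have hbc : b.length ≤ c.length := by
          rcases List.mem_cons.mp hc with rfl | hc'
          · exact le_refl _
          · exact hb c hc'
        simp only [PySem.List.len_eq] at hlt
        omega
      rw [List.sum_eq_zero hz]
      ring
    · simp only [matchInner, if_neg hlt]
      rw [ih _ hbs]
      have hadd : (if PySem.List.len s = PySem.List.len b then rotateMatch s b else 0)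
          = rotateMatch s b := by
        by_cases he : PySem.List.len s = PySem.List.len b
        · rw [if_pos he]
        · rw [if_neg he, rotateMatch_eq_zero_of_len_ne]
          intro hc
          exact he (by simp [PySem.List.len_eq, hc])
      rw [hadd, List.map_cons, List.sum_cons]
      ring

theorem extractStep_eq_scanStepG (N i j : Int) (st : List (List Int) × List (List (Int × Int))) :
    extractStep N 0 1 i j st = scanStepG N i j st := by
  unfold extractStep scanStepG
  by_cases h : get2 st.1 i j = some 0 <;> simp [h]

theorem extractStep_eq_scanStepP (N i j : Int) (st : List (List Int) × List (List (Int × Int))) :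
    extractStep N 1 0 i j st = scanStepP N i j st := by
  unfold extractStep scanStepP
  by_cases h : get2 st.1 i j = some 1 <;> simp [h]

theorem scan_split (gb pz : List (List Int)) (N : Int) :
    ((PySem.List.pyRange 0 N 1).foldl (fun st i =>
        (PySem.List.pyRange 0 N 1).foldl
          (fun st j => (scanStepG N i j st.1, scanStepP N i j st.2)) st)
      ((gb, ([] : List (List (Int × Int)))), (pz, ([] : List (List (Int × Int))))))
    = (((PySem.List.pyRange 0 N 1).foldl (fun a i =>
          (PySem.List.pyRange 0 N 1).foldl (fun a j => scanStepG N i j a) a) (gb, [])),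
       ((PySem.List.pyRange 0 N 1).foldl (fun a i =>
          (PySem.List.pyRange 0 N 1).foldl (fun a j => scanStepP N i j a) a) (pz, []))) := by
  exact foldl_nested_prod _ _ _ _ _

theorem extract_eq_scanG (gb : List (List Int)) (N : Int) :
    extract gb N 0 1 = ((PySem.List.pyRange 0 N 1).foldl (fun a i =>
      (PySem.List.pyRange 0 N 1).foldl (fun a j => scanStepG N i j a) a) (gb, [])).2 := by
  simp only [extract, extractStep_eq_scanStepG]

theorem extract_eq_scanP (pz : List (List Int)) (N : Int) :
    extract pz N 1 0 = ((PySem.List.pyRange 0 N 1).foldl (fun a i =>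
      (PySem.List.pyRange 0 N 1).foldl (fun a j => scanStepP N i j a) a) (pz, [])).2 := by
  simp only [extract, extractStep_eq_scanStepP]

theorem match_total (S B : List (List (Int × Int))) :
    (PySem.List.sorted S (fun s => PySem.List.len s) false).foldl
      (fun answer s =>
        matchInner s (PySem.List.sorted B (fun s => PySem.List.len s) false) answer) 0
    = (S.map (fun s => (B.map (fun b => rotateMatch s b)).sum)).sum := by
  have hpw : (PySem.List.sorted B (fun s => PySem.List.len s) false).Pairwise
      (fun a b => a.length ≤ b.length) := by
    refine (PySem.List.sorted_pairwise B (fun s => PySem.List.len s)).imp ?_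
    intro a b h
    simp only [PySem.List.len_eq] at h
    exact_mod_cast h
  rw [PySem.List.foldl_congr_mem _ _
      (fun acc s => acc + ((PySem.List.sorted B (fun s => PySem.List.len s) false).map
        (fun b => rotateMatch s b)).sum) 0
      (fun acc x _ => matchInner_eq x _ acc hpw)]
  rw [PySem.List.foldl_add]
  have h1 : ∀ s : List (Int × Int),
      ((PySem.List.sorted B (fun s => PySem.List.len s) false).map
        (fun b => rotateMatch s b)).sum = (B.map (fun b => rotateMatch s b)).sum :=
    fun s => ((PySem.List.sorted_perm B (fun s => PySem.List.len s) false).map _).sum_eq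
  simp only [h1, zero_add]
  exact ((PySem.List.sorted_perm S (fun s => PySem.List.len s) false).map _).sum_eq

theorem solution_eq_sum (game_board puzzle : List (List Int)) :
    solution game_board puzzle =
      ((extract game_board (PySem.List.len game_board) 0 1).map (fun s =>
        ((extract puzzle (PySem.List.len game_board) 1 0).map
          (fun b => rotateMatch s b)).sum)).sum := by
  simp only [solution]
  rw [scan_split]
  rw [extract_eq_scanG, extract_eq_scanP]
  exact match_total _ _

theorem getD_rotInner (b s : List (Int × Int)) (rd : PySem.Dict (List (Int × Int)) Int) :
    (((List.range 3).foldl (fun st _ => rotStep b st)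
        (b, (PySem.Set.empty : PySem.Set (List (Int × Int))), rd)).2.2).getD s 0
    = rd.getD s 0 +
      (if s ≠ b ∧ (s = rotatePy b ∨ s = rotatePy (rotatePy b) ∨ s = rotatePy (rotatePy (rotatePy b)))
       then 1 else 0) := by
  have hstep : ∀ (r : List (Int × Int)) (seen : PySem.Set (List (Int × Int)))
      (rd' : PySem.Dict (List (Int × Int)) Int),
      rotStep b (r, seen, rd') =
        (rotatePy r,
         if rotatePy r ≠ b ∧ ¬(PySem.Set.contains seen (rotatePy r) = true)
           then PySem.Set.add seen (rotatePy r) else seen,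
         if rotatePy r ≠ b ∧ ¬(PySem.Set.contains seen (rotatePy r) = true)
           then rd'.insert (rotatePy r) (rd'.getD (rotatePy r) 0 + 1) else rd') := by
    intro r seen rd'
    simp only [rotStep]
    split_ifs <;> rfl
  rw [show List.range 3 = [0, 1, 2] from rfl]
  simp only [List.foldl_cons, List.foldl_nil, hstep]
  simp only [PySem.Set.contains_iff]
  split_ifs
  all_goals try simp_all [PySem.Dict.getD_insert, PySem.Set.empty]
  all_goals try (split_ifs <;> simp_all)
  all_goals first
    | (rename_i hA hB
       obtain ⟨hsb, hs | hs⟩ := hA <;> subst hs <;> simp_all)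
    | (intro he; subst he; simp_all)

theorem getD_rotFold (cond : List (Int × Int) → Bool) (Bs : List (List (Int × Int)))
    (d : PySem.Dict (List (Int × Int)) Int) (s : List (Int × Int)) :
    (Bs.foldl (fun rd b =>
        if cond b = true then
          ((List.range 3).foldl (fun st _ => rotStep b st)
            (b, (PySem.Set.empty : PySem.Set (List (Int × Int))), rd)).2.2
        else rd) d).getD s 0
    = d.getD s 0 + (Bs.map (fun b =>
        if cond b = true ∧ s ≠ b ∧
            (s = rotatePy b ∨ s = rotatePy (rotatePy b) ∨ s = rotatePy (rotatePy (rotatePy b)))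
        then (1 : Int) else 0)).sum := by
  induction Bs generalizing d with
  | nil => simp
  | cons b t ih =>
    simp only [List.foldl_cons, List.map_cons, List.sum_cons]
    rw [ih]
    by_cases hc : cond b = true
    · rw [if_pos hc, getD_rotInner]
      by_cases hg : s ≠ b ∧
          (s = rotatePy b ∨ s = rotatePy (rotatePy b) ∨ s = rotatePy (rotatePy (rotatePy b)))
      · rw [if_pos hg, if_pos ⟨hc, hg⟩]; ring
      · rw [if_neg hg, if_neg (by tauto)]; ring
    · rw [if_neg hc, if_neg (by tauto)]; ring

theorem solution_alt_eq_sum (game_board puzzle : List (List Int)) :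
    solution_alt game_board puzzle =
      ((extract game_board (PySem.List.len game_board) 0 1).map (fun s =>
        ((extract puzzle (PySem.List.len game_board) 1 0).map
          (fun b => rotateMatch s b)).sum)).sum := by
  simp only [solution_alt]
  set S := extract game_board (PySem.List.len game_board) 0 1 with hS
  set B := extract puzzle (PySem.List.len game_board) 1 0 with hB
  set lens : PySem.Set Int := PySem.Set.ofList (S.map (fun s => PySem.List.len s)) with hlens
  rw [PySem.List.foldl_prod_mk
      (f := fun (d : PySem.Dict (List (Int × Int)) Int) (b : List (Int × Int)) =>
        d.insert b (d.getD b 0 + 1))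
      (g := fun rd b =>
        if PySem.Set.contains lens (PySem.List.len b) = true then
          ((List.range 3).foldl (fun st _ => rotStep b st)
            (b, (PySem.Set.empty : PySem.Set (List (Int × Int))), rd)).2.2
        else rd)]
  rw [PySem.List.foldl_congr_mem _ _
      (fun (ans : Int) (s : List (Int × Int)) => ans +
        ((B.foldl (fun (d : PySem.Dict (List (Int × Int)) Int) (b : List (Int × Int)) =>
            d.insert b (d.getD b 0 + 1))
            (PySem.Dict.empty : PySem.Dict (List (Int × Int)) Int)).getD s 0 +
         (B.foldl (fun (rd : PySem.Dict (List (Int × Int)) Int) (b : List (Int × Int)) =>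
            if PySem.Set.contains lens (PySem.List.len b) = true then
              ((List.range 3).foldl (fun st _ => rotStep b st)
                (b, (PySem.Set.empty : PySem.Set (List (Int × Int))), rd)).2.2
            else rd)
            (PySem.Dict.empty : PySem.Dict (List (Int × Int)) Int)).getD s 0
          * PySem.List.len s)) 0
      (fun acc x _ => add_assoc acc _ _)]
  rw [PySem.List.foldl_add, zero_add]
  refine congrArg List.sum (List.map_congr_left ?_)
  intro s hs
  rw [PySem.Dict.getD_foldl_insert_add_one, PySem.Dict.getD_empty,
    getD_rotFold, PySem.Dict.getD_empty, zero_add, zero_add]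
  simp only [rotateMatch_eq]
  rw [PySem.List.sum_map_add_int]
  congr 1
  · rw [show (fun b => if b = s then (1 : Int) else 0)
        = (fun b => if (b == s) = true then (1 : Int) else 0) from funext (fun b => by simp),
      PySem.List.sum_map_ite_one_zero]
    rw [List.count_eq_countP]
  · rw [List.sum_map_mul_right, PySem.List.len_eq]
    congr 1
    refine congrArg List.sum (List.map_congr_left ?_)
    intro b _
    by_cases hg : s ≠ b ∧
        (s = rotatePy b ∨ s = rotatePy (rotatePy b) ∨ s = rotatePy (rotatePy (rotatePy b)))
    · have hlen : s.length = b.length := by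
        rcases hg.2 with h | h | h <;>
          simp [h, length_rotatePy]
      have hcond : PySem.Set.contains lens (PySem.List.len b) = true := by
        rw [PySem.Set.contains_iff, hlens, PySem.Set.mem_ofList]
        exact List.mem_map.mpr ⟨s, hs, by simp [PySem.List.len_eq, hlen]⟩
      rw [if_pos hg, if_pos ⟨hcond, hg⟩]
    · rw [if_neg hg, if_neg (by tauto)]

-- ===== VERDICT (by name: the statement is the Claim_ definition above) =====
theorem solution_spec : Claim_equal_solution := by
  intro game_board puzzle _ _
  unfold Spec_solution
  rw [solution_eq_sum, solution_alt_eq_sum]
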